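-- pv_equiv track=rewrite | github.com/JasonXuDeveloper/TracingRAG | tracingrag/services/relationship_manager.py | _generate_decisions_summary
-- ===== SOURCE A (Python) =====
-- from typing import TYPE_CHECKING, Any
--
-- def _generate_decisions_summary(decisions: list[dict[str, Any]], round_num: int) -> str:
--     """Generate concise summary of decisions for next round
--
--     Args:
--         decisions: Decisions from current round
--         round_num: Current round number
--
--     Returns:
--         Concise summary string
--     """
--     summary_parts = [f"**Round {round_num} Decisions**:"]
--
--     kept = [d for d in decisions if d.get("action") == "keep_existing"]
--     updated = [d for d in decisions if d.get("action") == "update_to_newer"]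
--     removed = [d for d in decisions if d.get("action") == "remove_existing"]
--     created = [d for d in decisions if d.get("action") == "create_new"]
--
--     if kept:
--         summary_parts.append(f"- Kept {len(kept)} existing relationships")
--     if updated:
--         summary_parts.append(f"- Updated {len(updated)} to newer versions")
--     if removed:
--         summary_parts.append(f"- Removed {len(removed)} obsolete relationships")
--     if created:
--         summary_parts.append(
--             f"- Created {len(created)} new: "
--             + ", ".join(
--                 f"{d.get('relationship_type', 'UNK')} → {d.get('target_topic', 'unknown')}"
--                 for d in created[:5]  # Show first 5
--             )
--         )
--         if len(created) > 5:
--             summary_parts.append(f"  ... and {len(created) - 5} more")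
--
--     return "\n".join(summary_parts)
-- ===== SOURCE B (Python) =====
-- def _generate_decisions_summary(decisions, round_num):
--     # Single pass with counters and a capped preview list instead of four filtering passes.
--     kept = updated = removed = created_count = 0
--     preview = []
--     for d in decisions:
--         a = d.get("action")
--         if a == "keep_existing":
--             kept += 1
--         elif a == "update_to_newer":
--             updated += 1
--         elif a == "remove_existing":
--             removed += 1
--         elif a == "create_new":
--             created_count += 1
--             if len(preview) < 5:
--                 preview.append(f"{d.get('relationship_type', 'UNK')} → {d.get('target_topic', 'unknown')}")
--     parts = [f"**Round {round_num} Decisions**:"]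
--     if kept:
--         parts.append(f"- Kept {kept} existing relationships")
--     if updated:
--         parts.append(f"- Updated {updated} to newer versions")
--     if removed:
--         parts.append(f"- Removed {removed} obsolete relationships")
--     if created_count:
--         parts.append(f"- Created {created_count} new: " + ", ".join(preview))
--         if created_count > 5:
--             parts.append(f"  ... and {created_count - 5} more")
--     return "\n".join(parts)
-- ===== Notes on version B (the rewrite author's own statement) =====
-- stated objective: alternative
-- what changed: Replaces four full filtering passes over decisions (plus a slice of the created list) with a single loop maintaining integer counters and a preview list capped at five entries.
import Mathlib
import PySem

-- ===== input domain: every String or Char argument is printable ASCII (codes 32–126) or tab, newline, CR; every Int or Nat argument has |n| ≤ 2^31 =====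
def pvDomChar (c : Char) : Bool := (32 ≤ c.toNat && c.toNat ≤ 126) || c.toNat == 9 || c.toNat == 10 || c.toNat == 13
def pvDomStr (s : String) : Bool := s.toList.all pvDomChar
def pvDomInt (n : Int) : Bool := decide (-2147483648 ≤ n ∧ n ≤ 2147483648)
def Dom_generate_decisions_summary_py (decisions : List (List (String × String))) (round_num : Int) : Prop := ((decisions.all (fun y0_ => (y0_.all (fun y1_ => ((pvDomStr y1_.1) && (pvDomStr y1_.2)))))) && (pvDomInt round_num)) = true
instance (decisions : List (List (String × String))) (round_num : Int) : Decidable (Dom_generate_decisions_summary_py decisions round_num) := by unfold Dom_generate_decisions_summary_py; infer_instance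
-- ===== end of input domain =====

-- B is a single pass with counters and a capped preview list instead of A's four filtering passes; same return value.

-- ===== PORT A =====
-- f"{d.get('relationship_type', 'UNK')} → {d.get('target_topic', 'unknown')}" (dict.get = first match in the assoc list)
def pvFmtCreated (d : List (String × String)) : String :=
  ((d.lookup "relationship_type").getD "UNK") ++ " → " ++ ((d.lookup "target_topic").getD "unknown")

def generate_decisions_summary_py (decisions : List (List (String × String))) (round_num : Int) : String :=
  let summary0 := ["**Round " ++ PySem.Int.toStr round_num ++ " Decisions**:"]
  let kept := decisions.filter (fun d => d.lookup "action" == some "keep_existing")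
  let updated := decisions.filter (fun d => d.lookup "action" == some "update_to_newer")
  let removed := decisions.filter (fun d => d.lookup "action" == some "remove_existing")
  let created := decisions.filter (fun d => d.lookup "action" == some "create_new")
  let s1 := if kept.isEmpty then summary0 else
    summary0 ++ ["- Kept " ++ PySem.Int.toStr kept.length ++ " existing relationships"]
  let s2 := if updated.isEmpty then s1 else
    s1 ++ ["- Updated " ++ PySem.Int.toStr updated.length ++ " to newer versions"]
  let s3 := if removed.isEmpty then s2 else
    s2 ++ ["- Removed " ++ PySem.Int.toStr removed.length ++ " obsolete relationships"]
  let s4 := if created.isEmpty then s3 else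
    (s3 ++ ["- Created " ++ PySem.Int.toStr created.length ++ " new: " ++
        PySem.Str.join ", " ((PySem.List.slice created none (some 5)).map pvFmtCreated)]) ++
    (if created.length > 5 then ["  ... and " ++ PySem.Int.toStr ((created.length : Int) - 5) ++ " more"] else [])
  PySem.Str.join "\n" s4

-- ===== PORT B =====
-- the body of B's single loop
def pvStep (s : Nat × Nat × Nat × Nat × List String) (d : List (String × String)) :
    Nat × Nat × Nat × Nat × List String :=
  let (k, u, r, c, p) := s
  let a := d.lookup "action"
  if a == some "keep_existing" then (k + 1, u, r, c, p)
  else if a == some "update_to_newer" then (k, u + 1, r, c, p)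
  else if a == some "remove_existing" then (k, u, r + 1, c, p)
  else if a == some "create_new" then
    (k, u, r, c + 1, if p.length < 5 then p ++ [pvFmtCreated d] else p)
  else (k, u, r, c, p)

def generate_decisions_summary_py_alt (decisions : List (List (String × String))) (round_num : Int) : String :=
  let st := decisions.foldl pvStep (0, 0, 0, 0, [])
  let k := st.1; let u := st.2.1; let r := st.2.2.1; let c := st.2.2.2.1; let p := st.2.2.2.2
  let parts := ["**Round " ++ PySem.Int.toStr round_num ++ " Decisions**:"]
    ++ (if k ≠ 0 then ["- Kept " ++ PySem.Int.toStr k ++ " existing relationships"] else [])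
    ++ (if u ≠ 0 then ["- Updated " ++ PySem.Int.toStr u ++ " to newer versions"] else [])
    ++ (if r ≠ 0 then ["- Removed " ++ PySem.Int.toStr r ++ " obsolete relationships"] else [])
    ++ (if c ≠ 0 then ["- Created " ++ PySem.Int.toStr c ++ " new: " ++ PySem.Str.join ", " p] else [])
    ++ (if c > 5 then ["  ... and " ++ PySem.Int.toStr ((c : Int) - 5) ++ " more"] else [])
  PySem.Str.join "\n" parts

-- ===== PRECONDITION & SPEC =====
def Spec_generate_decisions_summary_py (decisions : List (List (String × String))) (round_num : Int) (out : String) : Prop := out = generate_decisions_summary_py_alt decisions round_num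
instance (decisions : List (List (String × String))) (round_num : Int) (out : String) : Decidable (Spec_generate_decisions_summary_py decisions round_num out) := by unfold Spec_generate_decisions_summary_py; infer_instance

-- ===== CLAIM (what is proved, stated in full; the proofs are below) =====
def Claim_equal_generate_decisions_summary_py : Prop := ∀ (decisions : List (List (String × String))) (round_num : Int), Dom_generate_decisions_summary_py decisions round_num → Spec_generate_decisions_summary_py decisions round_num (generate_decisions_summary_py decisions round_num)

-- ===== LEMMAS AND PROOFS =====

lemma pvFold_spec (l : List (List (String × String))) :
    ∀ (k u r c : Nat) (p : List String), p.length ≤ 5 →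
    l.foldl pvStep (k, u, r, c, p) =
      (k + (l.filter (fun d => d.lookup "action" == some "keep_existing")).length,
       u + (l.filter (fun d => d.lookup "action" == some "update_to_newer")).length,
       r + (l.filter (fun d => d.lookup "action" == some "remove_existing")).length,
       c + (l.filter (fun d => d.lookup "action" == some "create_new")).length,
       p ++ (((l.filter (fun d => d.lookup "action" == some "create_new")).take (5 - p.length)).map pvFmtCreated)) := by
  induction l with
  | nil => intro k u r c p hp; simp
  | cons d t ih =>
    intro k u r c p hp
    simp only [List.foldl_cons, pvStep, List.filter_cons]
    by_cases h1 : d.lookup "action" == some "keep_existing"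
    · simp only [h1, if_pos]
      have h2 : (d.lookup "action" == some "update_to_newer") = false := by
        cases hl : d.lookup "action" <;> simp_all
      have h3 : (d.lookup "action" == some "remove_existing") = false := by
        cases hl : d.lookup "action" <;> simp_all
      have h4 : (d.lookup "action" == some "create_new") = false := by
        cases hl : d.lookup "action" <;> simp_all
      rw [ih (k+1) u r c p hp]
      simp [h2, h3, h4, Nat.add_assoc, Nat.add_comm 1]
    · simp only [h1, ite_false, Bool.false_eq_true]
      by_cases h2 : d.lookup "action" == some "update_to_newer"
      · have h3 : (d.lookup "action" == some "remove_existing") = false := by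
          cases hl : d.lookup "action" <;> simp_all
        have h4 : (d.lookup "action" == some "create_new") = false := by
          cases hl : d.lookup "action" <;> simp_all
        rw [if_pos h2, ih k (u+1) r c p hp]
        simp [h2, h3, h4, Nat.add_assoc, Nat.add_comm 1]
      · rw [if_neg (by simp_all)]
        by_cases h3 : d.lookup "action" == some "remove_existing"
        · have h4 : (d.lookup "action" == some "create_new") = false := by
            cases hl : d.lookup "action" <;> simp_all
          rw [if_pos h3, ih k u (r+1) c p hp]
          simp [h2, h3, h4, Nat.add_assoc, Nat.add_comm 1]
        · rw [if_neg (by simp_all)]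
          by_cases h4 : d.lookup "action" == some "create_new"
          · rw [if_pos h4]
            by_cases hp5 : p.length < 5
            · rw [if_pos hp5, ih k u r (c+1) (p ++ [pvFmtCreated d]) (by simp; omega)]
              have : 5 - p.length = (5 - (p ++ [pvFmtCreated d]).length) + 1 := by simp; omega
              simp [h2, h3, h4, this, Nat.add_assoc, Nat.add_comm 1, List.take_succ_cons]
            · have hp5' : p.length = 5 := by omega
              rw [if_neg hp5, ih k u r (c+1) p hp]
              simp [h2, h3, h4, hp5', Nat.add_assoc, Nat.add_comm 1]
          · rw [if_neg (by simp_all), ih k u r c p hp]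
            simp [h2, h3, h4]

-- ===== VERDICT (by name: the statement is the Claim_ definition above) =====
theorem generate_decisions_summary_py_spec : Claim_equal_generate_decisions_summary_py := by
  intro decisions round_num _
  unfold Spec_generate_decisions_summary_py
  simp only [generate_decisions_summary_py, generate_decisions_summary_py_alt]
  rw [pvFold_spec decisions 0 0 0 0 [] (by simp)]
  rw [show (5:Int) = ((5:Nat):Int) from rfl, PySem.List.slice_to_natCast]
  simp only [Nat.zero_add, List.nil_append]
  generalize decisions.filter (fun d => d.lookup "action" == some "keep_existing") = K
  generalize decisions.filter (fun d => d.lookup "action" == some "update_to_newer") = U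
  generalize decisions.filter (fun d => d.lookup "action" == some "remove_existing") = R
  generalize decisions.filter (fun d => d.lookup "action" == some "create_new") = C
  by_cases hK : K = [] <;> by_cases hU : U = [] <;> by_cases hR : R = [] <;>
    by_cases hC : C = [] <;> by_cases h5 : C.length > 5 <;>
    simp_all [List.isEmpty_iff, List.length_eq_zero_iff]
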